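-- pv_equiv track=rewrite | github.com/raguiar2/PraticeQuestions | longest_inc_subarray.py | longest_cont_inc_subarray
-- ===== SOURCE A (Python) =====
-- def longest_cont_inc_subarray(arr):
-- 	maxlen = 1
-- 	currlen = 1
-- 	for i in range(len(arr)):
-- 		currelem = arr[i]
-- 		currlen = 1
-- 		for j in range(i+1,len(arr)):
-- 			if arr[j] > currelem:
-- 				currelem = arr[j]
-- 				currlen += 1
-- 		maxlen = max(currlen,maxlen)
-- 	return maxlen
-- ===== SOURCE B (Python) =====
-- def longest_cont_inc_subarray(arr):
--     # One right-to-left pass with a monotonic stack: for each position the greedy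
--     # chain length is 1 + chain length at its next strictly greater element.
--     best = 1
--     stack = []  # entries (value, chain_len); top at the end; values strictly increase towards the bottom
--     for x in reversed(arr):
--         while stack and stack[-1][0] <= x:
--             stack.pop()
--         f = stack[-1][1] + 1 if stack else 1
--         stack.append((x, f))
--         if f > best:
--             best = f
--     return best
-- ===== Notes on version B (the rewrite author's own statement) =====
-- stated objective: faster
-- what changed: Replaced the quadratic per-start greedy rescans with a single right-to-left monotonic-stack pass computing each start's chain length as 1 + the chain length at its next strictly greater element.
import Mathlib
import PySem

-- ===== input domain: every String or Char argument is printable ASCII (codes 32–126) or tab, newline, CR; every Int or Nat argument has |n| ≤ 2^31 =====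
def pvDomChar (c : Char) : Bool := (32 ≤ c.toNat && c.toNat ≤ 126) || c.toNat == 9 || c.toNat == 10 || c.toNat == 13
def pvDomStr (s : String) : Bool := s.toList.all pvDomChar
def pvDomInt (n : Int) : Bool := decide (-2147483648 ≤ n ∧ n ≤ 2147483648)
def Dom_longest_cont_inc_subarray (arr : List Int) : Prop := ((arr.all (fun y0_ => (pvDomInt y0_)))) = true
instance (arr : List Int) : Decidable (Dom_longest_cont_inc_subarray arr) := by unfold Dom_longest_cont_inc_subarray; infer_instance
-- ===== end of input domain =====

-- B replaces A's quadratic per-start greedy rescans by one right-to-left monotonic-stack pass (objective: faster).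

-- ===== PORT A =====
def longest_cont_inc_subarray (arr : List Int) : Int :=
  (PySem.List.pyRange 0 (arr.length : Int)).foldl
    (fun maxlen i =>
      max ((PySem.List.pyRange (i + 1) (arr.length : Int)).foldl
        (fun (s : Int × Int) j =>
          if PySem.List.pyGetD arr j 0 > s.1 then (PySem.List.pyGetD arr j 0, s.2 + 1) else s)
        (PySem.List.pyGetD arr i 0, 1)).2 maxlen)
    1

-- ===== PORT B =====
-- chain length pushed for the new element: 1 + count at the next strictly greater element (1 if none)
def pvTopLen : List (Int × Int) → Int
  | [] => 1
  | p :: _ => p.2 + 1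

-- one step of Source B's loop body; the stack keeps its top at the HEAD of the list
-- (Source B keeps the top at the end: its while-pop from the end is dropWhile at the head here)
def pvAltStep (s : Int × List (Int × Int)) (x : Int) : Int × List (Int × Int) :=
  let rest := s.2.dropWhile (fun p => p.1 ≤ x)
  let f := pvTopLen rest
  (if f > s.1 then f else s.1, (x, f) :: rest)

-- 'for x in reversed(arr)' is a left fold over arr.reverse
def longest_cont_inc_subarray_alt (arr : List Int) : Int :=
  (arr.reverse.foldl pvAltStep (1, [])).1

-- ===== PRECONDITION & SPEC =====
def Spec_longest_cont_inc_subarray (arr : List Int) (out : Int) : Prop := out = longest_cont_inc_subarray_alt arr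
instance (arr : List Int) (out : Int) : Decidable (Spec_longest_cont_inc_subarray arr out) := by unfold Spec_longest_cont_inc_subarray; infer_instance

-- ===== CLAIM (what is proved, stated in full; the proofs are below) =====
def Claim_equal_longest_cont_inc_subarray : Prop := ∀ (arr : List Int), Dom_longest_cont_inc_subarray arr → Spec_longest_cont_inc_subarray arr (longest_cont_inc_subarray arr)

-- ===== LEMMAS AND PROOFS =====

-- number of strict running-record elements of l, starting from record c (A's inner-loop count minus 1)
def pvRecords : Int → List Int → Nat
  | _, [] => 0
  | c, y :: t => if c < y then 1 + pvRecords y t else pvRecords c t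

-- greedy chain length from each start position
def pvCounts : List Int → List Int
  | [] => []
  | x :: t => (1 + (pvRecords x t : Int)) :: pvCounts t

-- stack-count invariant: each entry's count is (number of entries from it to the bottom)
def pvGood : List (Int × Int) → Prop
  | [] => True
  | p :: rest => p.2 = (rest.length : Int) + 1 ∧ pvGood rest

lemma pv_dropWhile_dropWhile {α : Type} (p q : α → Bool) (h : ∀ a, q a = true → p a = true)
    (l : List α) : (l.dropWhile q).dropWhile p = l.dropWhile p := by
  induction l with
  | nil => rfl
  | cons a l ih =>
    by_cases hq : q a = true
    · simp [hq, h a hq, ih]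
    · simp [List.dropWhile_cons, hq]

lemma pv_good_dropWhile (p : Int × Int → Bool) (S : List (Int × Int)) (h : pvGood S) :
    pvGood (S.dropWhile p) := by
  induction S with
  | nil => exact h
  | cons a S ih =>
    by_cases hp : p a = true
    · simpa [List.dropWhile_cons, hp] using ih h.2
    · simpa [List.dropWhile_cons, hp] using h

-- B's loop invariant
lemma pv_alt_inv (arr : List Int) :
    pvGood (arr.reverse.foldl pvAltStep (1, [])).2 ∧
    (∀ x : Int, ((arr.reverse.foldl pvAltStep (1, [])).2.dropWhile (fun p => p.1 ≤ x)).length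
        = pvRecords x arr) ∧
    (arr.reverse.foldl pvAltStep (1, [])).1 = (pvCounts arr).foldr (fun c m => max m c) 1 := by
  induction arr with
  | nil => exact ⟨trivial, fun x => rfl, rfl⟩
  | cons x t ih =>
    obtain ⟨hg, hlen, hb⟩ := ih
    have hfold : (x :: t).reverse.foldl pvAltStep (1, []) =
        pvAltStep (t.reverse.foldl pvAltStep (1, [])) x := by
      simp [List.foldl_append]
    rw [hfold]
    generalize hR : t.reverse.foldl pvAltStep (1, []) = R at hg hlen hb
    have hgr : pvGood (R.2.dropWhile (fun p => p.1 ≤ x)) := pv_good_dropWhile _ _ hg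
    have hf : pvTopLen (R.2.dropWhile (fun p => p.1 ≤ x))
        = ((R.2.dropWhile (fun p => p.1 ≤ x)).length : Int) + 1 := by
      cases h : R.2.dropWhile (fun p => p.1 ≤ x) with
      | nil => simp [pvTopLen]
      | cons p rest' =>
        have hp := (h ▸ hgr).1
        simp [pvTopLen, hp]
    refine ⟨?_, ?_, ?_⟩
    · simp only [pvAltStep]
      exact ⟨hf, hgr⟩
    · intro z
      simp only [pvAltStep]
      by_cases hxz : x ≤ z
      · rw [List.dropWhile_cons_of_pos (by simpa using hxz),
            pv_dropWhile_dropWhile (fun p : Int × Int => decide (p.1 ≤ z))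
              (fun p : Int × Int => decide (p.1 ≤ x))
              (by intro a ha; simp at ha ⊢; omega), hlen z]
        simp only [pvRecords]
        rw [if_neg (by omega)]
      · rw [List.dropWhile_cons_of_neg (by simpa using hxz)]
        simp only [List.length_cons, hlen x, pvRecords]
        rw [if_pos (by omega)]
        omega
    · simp only [pvAltStep, pvCounts, List.foldr_cons, ← hb]
      rw [hf, hlen x]
      rw [max_def]
      split_ifs <;> omega

-- A's inner loop over a suffix list computes k + pvRecords
lemma pv_inner (l : List Int) : ∀ (c k : Int),
    (l.foldl (fun (s : Int × Int) y => if y > s.1 then (y, s.2 + 1) else s) (c, k)).2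
      = k + (pvRecords c l : Int) := by
  induction l with
  | nil => intro c k; simp [pvRecords]
  | cons y t ih =>
    intro c k
    by_cases h : c < y
    · simp only [List.foldl_cons, pvRecords, if_pos (show y > c from h), ih]
      push_cast; ring
    · simp only [List.foldl_cons, pvRecords, if_neg (show ¬ y > c from h), ih]

-- the index-based outer map over range(k, n) equals pvCounts of the k-th suffix
lemma pv_outer_map (arr : List Int) : ∀ (n k : Nat), arr.length - k = n → k ≤ arr.length →
    (PySem.List.pyRange (k : Int) (arr.length : Int)).map
      (fun i =>
        ((PySem.List.pyRange (i + 1) (arr.length : Int)).foldl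
          (fun (s : Int × Int) j =>
            if PySem.List.pyGetD arr j 0 > s.1 then (PySem.List.pyGetD arr j 0, s.2 + 1) else s)
          (PySem.List.pyGetD arr i 0, 1)).2)
      = pvCounts (arr.drop k) := by
  intro n
  induction n with
  | zero =>
    intro k h1 h2
    have hk : k = arr.length := by omega
    subst hk
    rw [PySem.List.pyRange_one_eq_nil le_rfl]
    simp [pvCounts]
  | succ n ih =>
    intro k h1 h2
    have hlt : k < arr.length := by omega
    rw [PySem.List.pyRange_one_cons (by exact_mod_cast hlt), List.map_cons]
    have hget : PySem.List.pyGetD arr (k : Int) 0 = arr[k] := by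
      rw [PySem.List.pyGetD_natCast, List.getD_eq_getElem?_getD, List.getElem?_eq_getElem hlt,
        Option.getD_some]
    have hdrop : arr.drop k = arr[k] :: arr.drop (k + 1) := List.drop_eq_getElem_cons hlt
    rw [hdrop]
    simp only [pvCounts]
    congr 1
    · rw [hget,
        PySem.List.foldl_pyRange_pyGetD' arr 0
          (fun (s : Int × Int) (y : Int) => if y > s.1 then (y, s.2 + 1) else s)
          (arr[k], 1) (a := (k : Int) + 1) (by omega),
        show ((k : Int) + 1).toNat = k + 1 by omega, pv_inner]
    · rw [show (k : Int) + 1 = ((k + 1 : Nat) : Int) by push_cast; ring]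
      have := ih (k + 1) (by omega) (by omega)
      exact this


lemma pv_foldl_max_comm (l : List Int) : ∀ (a : Int),
    l.foldl (fun m c => max c m) a = l.foldl max a := by
  induction l with
  | nil => intro a; rfl
  | cons x t ih => intro a; simp only [List.foldl_cons, ih]; rw [max_comm]

lemma pv_foldl_max_pull (l : List Int) : ∀ (a x : Int),
    l.foldl max (max a x) = max (l.foldl max a) x := by
  induction l with
  | nil => intro a x; rfl
  | cons y t ih =>
    intro a x
    simp only [List.foldl_cons]
    rw [max_right_comm, ih]

lemma pv_foldr_max (l : List Int) :
    l.foldr (fun c m => max m c) 1 = l.foldl max 1 := by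
  induction l with
  | nil => rfl
  | cons x t ih =>
    simp only [List.foldr_cons, List.foldl_cons, ih, pv_foldl_max_pull]

lemma pv_A_eq (arr : List Int) :
    longest_cont_inc_subarray arr = (pvCounts arr).foldl (fun m c => max c m) 1 := by
  unfold longest_cont_inc_subarray
  have h0 := pv_outer_map arr arr.length 0 (by omega) (by omega)
  rw [List.drop_zero, Nat.cast_zero] at h0
  rw [← h0, List.foldl_map]

theorem pv_main (arr : List Int) :
    longest_cont_inc_subarray arr = longest_cont_inc_subarray_alt arr := by
  rw [pv_A_eq, pv_foldl_max_comm]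
  unfold longest_cont_inc_subarray_alt
  rw [(pv_alt_inv arr).2.2, pv_foldr_max]

-- ===== VERDICT (by name: the statement is the Claim_ definition above) =====
theorem longest_cont_inc_subarray_spec : Claim_equal_longest_cont_inc_subarray := by
  intro arr _
  unfold Spec_longest_cont_inc_subarray
  exact pv_main arr
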